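/- GENERATED by c/gen_decode.py: decode facts of the image, one per distinct instruction byte string. -/
import UserX.DecodeImage

#decode_all Toyh.Dec
  "4c89e6"  -- mov rsi,r12
  "e8cdbbffff"  -- call 100d60
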